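-- pv_equiv track=rewrite | github.com/StefanNede/BIO-Practice | 2021/downPat.py | isPat
-- ===== SOURCE A (Python) =====
-- def isPat(string):
--     if len(string) == 1:
--         return True
--     else:
--         for i in range(1,len(string)): # explained on line 21
--             substring1 = string[:i]
--             substring2 = string[i:]
--             if min(substring1) > max(substring2):
--                 if isPat(substring1[::-1]) and isPat(substring2[::-1]):
--                     return True
--         return False
-- ===== SOURCE B (Python) =====
-- def isPat(string):
--     # Top-down memoized DP over (lo, hi, d) range states instead of A's naive
--     # recursion on substring copies; d == 1 means the state denotes the
--     # reversal of string[lo:hi].  Each distinct state is solved once.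
--     n = len(string)
--     if n == 0:
--         return False
--     memo = {}
--
--     def solve(lo, hi, d):
--         if hi - lo == 1:
--             return True
--         key = (lo, hi, d)
--         if key in memo:
--             return memo[key]
--         ok = False
--         for i in range(1, hi - lo):
--             if d == 0:
--                 m = lo + i
--                 if (min(string[lo:m]) > max(string[m:hi])
--                         and solve(lo, m, 1) and solve(m, hi, 1)):
--                     ok = True
--                     break
--             else:
--                 m = hi - i
--                 if (min(string[m:hi]) > max(string[lo:m])
--                         and solve(m, hi, 0) and solve(lo, m, 0)):
--                     ok = True
--                     break
--         memo[key] = ok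
--         return ok
--
--     return solve(0, n, 0)
-- ===== Notes on version B (the rewrite author's own statement) =====
-- stated objective: alternative
-- what changed: Replaces A's naive recursion on reversed substring copies (which re-solves repeated subproblems) by a top-down memoized DP over (lo, hi, direction) index states, each distinct state solved once and stored in a dict.
import Mathlib
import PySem

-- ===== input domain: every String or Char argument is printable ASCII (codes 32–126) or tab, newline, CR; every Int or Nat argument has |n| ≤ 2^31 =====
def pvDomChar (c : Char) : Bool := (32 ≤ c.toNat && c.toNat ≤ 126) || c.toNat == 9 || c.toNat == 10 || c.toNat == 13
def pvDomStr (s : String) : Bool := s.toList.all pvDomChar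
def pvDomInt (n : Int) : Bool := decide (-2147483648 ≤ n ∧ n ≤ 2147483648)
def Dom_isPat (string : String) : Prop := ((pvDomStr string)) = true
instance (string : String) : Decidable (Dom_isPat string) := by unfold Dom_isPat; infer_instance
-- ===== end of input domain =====

-- B replaces A's naive recursion on reversed substring copies by a memoized top-down DP
-- over (lo, hi, direction) range states, each distinct state solved once (objective: alternative).

-- ===== PORT A =====
-- A's recursive core on the character list; string[:i] / string[i:] are PySem slices,
-- string[::-1] is ported as .reverse (PySem.List.slice?_none_none_neg_one), min/max via
-- PySem.List.min?/max? (the `none` match arm is Python's ValueError on an empty slice,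
-- unreachable here since 1 ≤ i < len).
def pvGoA : List Char → Bool := fun l =>
  if l.length = 1 then true
  else
    (PySem.List.pyRange 1 (l.length : Int) 1).attach.any (fun ⟨i, hmem⟩ =>
      let s1 := PySem.List.slice l none (some i)
      let s2 := PySem.List.slice l (some i) none
      match PySem.List.min? s1 (fun c => c), PySem.List.max? s2 (fun c => c) with
      | some m1, some m2 => decide (m2 < m1) && pvGoA s1.reverse && pvGoA s2.reverse
      | _, _ => false)
termination_by l => l.length
decreasing_by
  all_goals {
    rw [PySem.List.mem_pyRange_one] at hmem
    simp [PySem.List.slice_to _ (by omega : (0:Int) ≤ i),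
          PySem.List.slice_from _ (by omega : (0:Int) ≤ i)]
    omega }

def isPat (string : String) : Bool := pvGoA string.toList

-- ===== PORT B =====
-- Source B's `solve` (pvSolve) with its split loop as a fold (pvStep): the `break` is the
-- standard skip-once-found fold state, the memo dict is threaded exactly as the Python
-- closure mutates it.  The Nat `fuel` argument is a totality guard only: spans shrink
-- strictly, so any fuel ≥ the initial span makes the 0-fuel branch unreachable.
def pvStep (l : List Char)
    (solve : Int → Int → Int → PySem.Dict (Int × Int × Int) Bool →
      PySem.Dict (Int × Int × Int) Bool × Bool)
    (lo hi d : Int) (st : PySem.Dict (Int × Int × Int) Bool × Bool) (i : Int) :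
    PySem.Dict (Int × Int × Int) Bool × Bool :=
  if st.2 then st
  else if d == 0 then
    let m := lo + i
    match PySem.List.min? (PySem.List.slice l (some lo) (some m)) (fun c => c),
          PySem.List.max? (PySem.List.slice l (some m) (some hi)) (fun c => c) with
    | some mn, some mx =>
      if decide (mx < mn) then
        let r1 := solve lo m 1 st.1
        if r1.2 then
          let r2 := solve m hi 1 r1.1
          if r2.2 then (r2.1, true) else (r2.1, false)
        else (r1.1, false)
      else st
    | _, _ => st
  else
    let m := hi - i
    match PySem.List.min? (PySem.List.slice l (some m) (some hi)) (fun c => c),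
          PySem.List.max? (PySem.List.slice l (some lo) (some m)) (fun c => c) with
    | some mn, some mx =>
      if decide (mx < mn) then
        let r1 := solve m hi 0 st.1
        if r1.2 then
          let r2 := solve lo m 0 r1.1
          if r2.2 then (r2.1, true) else (r2.1, false)
        else (r1.1, false)
      else st
    | _, _ => st

def pvSolve (l : List Char) : Nat → Int → Int → Int → PySem.Dict (Int × Int × Int) Bool →
    PySem.Dict (Int × Int × Int) Bool × Bool
  | 0, _, _, _, memo => (memo, false)  -- unreachable under sufficient fuel
  | fuel + 1, lo, hi, d, memo =>
    if hi - lo == 1 then (memo, true)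
    else
      match memo.get? (lo, hi, d) with
      | some v => (memo, v)
      | none =>
        let r := (PySem.List.pyRange 1 (hi - lo) 1).foldl
          (pvStep l (pvSolve l fuel) lo hi d) (memo, false)
        (r.1.insert (lo, hi, d) r.2, r.2)

def isPat_alt (string : String) : Bool :=
  let l := string.toList
  let n : Int := (l.length : Int)
  if n == 0 then false
  else (pvSolve l l.length 0 n 0 PySem.Dict.empty).2

-- ===== PRECONDITION & SPEC =====
def Spec_isPat (string : String) (out : Bool) : Prop := out = isPat_alt string
instance (string : String) (out : Bool) : Decidable (Spec_isPat string out) := by unfold Spec_isPat; infer_instance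

-- ===== CLAIM (what is proved, stated in full; the proofs are below) =====
def Claim_equal_isPat : Prop := ∀ (string : String), Dom_isPat string → Spec_isPat string (isPat string)

-- ===== LEMMAS AND PROOFS =====

-- the substring-state a memo key (lo, hi, d) denotes
def pvView (l : List Char) (lo hi d : Int) : List Char :=
  if d = 0 then PySem.List.slice l (some lo) (some hi)
  else (PySem.List.slice l (some lo) (some hi)).reverse

-- A's value on that state
def pvG (l : List Char) (lo hi d : Int) : Bool := pvGoA (pvView l lo hi d)

-- what one split-loop iteration of B decides, expressed through A's values
def pvBody (l : List Char) (lo hi d : Int) (i : Int) : Bool :=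
  if d == 0 then
    let m := lo + i
    match PySem.List.min? (PySem.List.slice l (some lo) (some m)) (fun c => c),
          PySem.List.max? (PySem.List.slice l (some m) (some hi)) (fun c => c) with
    | some mn, some mx => decide (mx < mn) && pvG l lo m 1 && pvG l m hi 1
    | _, _ => false
  else
    let m := hi - i
    match PySem.List.min? (PySem.List.slice l (some m) (some hi)) (fun c => c),
          PySem.List.max? (PySem.List.slice l (some lo) (some m)) (fun c => c) with
    | some mn, some mx => decide (mx < mn) && pvG l m hi 0 && pvG l lo m 0
    | _, _ => false

-- the memo invariant: every stored value is A's value for its state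
def pvSound (l : List Char) (memo : PySem.Dict (Int × Int × Int) Bool) : Prop :=
  ∀ lo hi d v, memo.get? (lo, hi, d) = some v → v = pvG l lo hi d

lemma pvAnyCongr {α : Type} (l : List α) (f g : α → Bool) (h : ∀ x ∈ l, f x = g x) :
    l.any f = l.any g := by
  induction l with
  | nil => rfl
  | cons a t ih => simp_all [List.any_cons]

lemma pvMinRev (xs : List Char) :
    PySem.List.min? xs.reverse (fun c => c) = PySem.List.min? xs (fun c => c) := by
  cases h1 : PySem.List.min? xs.reverse (fun c => c) with
  | none =>
    rw [PySem.List.min?_eq_none_iff] at h1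
    simp only [List.reverse_eq_nil_iff] at h1
    subst h1; rfl
  | some m1 =>
    cases h2 : PySem.List.min? xs (fun c => c) with
    | none =>
      rw [PySem.List.min?_eq_none_iff] at h2
      subst h2
      have := PySem.List.min?_mem h1
      simp at this
    | some m2 =>
      have hm1 := PySem.List.min?_mem h1
      have hm2 := PySem.List.min?_mem h2
      have le1 := PySem.List.min?_isMin h1 m2 (by simpa using hm2)
      have le2 := PySem.List.min?_isMin h2 m1 (by simpa using hm1)
      exact congrArg some (le_antisymm le1 le2)

lemma pvMaxRev (xs : List Char) :
    PySem.List.max? xs.reverse (fun c => c) = PySem.List.max? xs (fun c => c) := by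
  cases h1 : PySem.List.max? xs.reverse (fun c => c) with
  | none =>
    rw [PySem.List.max?_eq_none_iff] at h1
    simp only [List.reverse_eq_nil_iff] at h1
    subst h1; rfl
  | some m1 =>
    cases h2 : PySem.List.max? xs (fun c => c) with
    | none =>
      rw [PySem.List.max?_eq_none_iff] at h2
      subst h2
      have := PySem.List.max?_mem h1
      simp at this
    | some m2 =>
      have hm1 := PySem.List.max?_mem h1
      have hm2 := PySem.List.max?_mem h2
      have le1 := PySem.List.max?_isMax h1 m2 (by simpa using hm2)
      have le2 := PySem.List.max?_isMax h2 m1 (by simpa using hm1)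
      exact congrArg some (le_antisymm le2 le1)

lemma pvSliceTN (l : List Char) (a b : Int) (h0 : 0 ≤ a) (h1 : a ≤ b) :
    PySem.List.slice l (some a) (some b) = (l.drop a.toNat).take (b.toNat - a.toNat) :=
  PySem.List.slice_toNat l h0 (by omega)

lemma pvGoA_one (xs : List Char) (h : xs.length = 1) : pvGoA xs = true := by
  rw [pvGoA]; simp [h]

lemma pvG_one (l : List Char) (lo : Int) (d : Int) (h0 : 0 ≤ lo) (hn : lo + 1 ≤ (l.length : Int)) :
    pvG l lo (lo + 1) d = true := by
  have hs : PySem.List.slice l (some lo) (some (lo + 1)) = (l.drop lo.toNat).take ((lo + 1).toNat - lo.toNat) :=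
    pvSliceTN l lo (lo + 1) h0 (by omega)
  have hlen : (PySem.List.slice l (some lo) (some (lo + 1))).length = 1 := by
    rw [hs]; simp; omega
  unfold pvG pvView
  split
  · exact pvGoA_one _ hlen
  · exact pvGoA_one _ (by simpa using hlen)

lemma pvGoA_eq_any (xs : List Char) (h : xs.length ≠ 1) :
    pvGoA xs = (PySem.List.pyRange 1 (xs.length : Int) 1).any (fun i =>
      match PySem.List.min? (PySem.List.slice xs none (some i)) (fun c => c),
            PySem.List.max? (PySem.List.slice xs (some i) none) (fun c => c) with
      | some m1, some m2 => decide (m2 < m1)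
          && pvGoA (PySem.List.slice xs none (some i)).reverse
          && pvGoA (PySem.List.slice xs (some i) none).reverse
      | _, _ => false) := by
  rw [pvGoA, if_neg h]
  exact (List.any_subtype (fun x hx => rfl)).trans (by rw [List.unattach_attach])

-- the split recurrence: A's value on a state is the `any` of B's split bodies
lemma pvAnyBody_correct (l : List Char) (lo hi d : Int)
    (h0 : 0 ≤ lo) (h2 : lo + 2 ≤ hi) (hn : hi ≤ (l.length : Int)) (hd : d = 0 ∨ d = 1) :
    (PySem.List.pyRange 1 (hi - lo) 1).any (pvBody l lo hi d) = pvG l lo hi d := by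
  have hslice : PySem.List.slice l (some lo) (some hi) = (l.drop lo.toNat).take (hi.toNat - lo.toNat) :=
    pvSliceTN l lo hi h0 (by omega)
  have hlenseg : (PySem.List.slice l (some lo) (some hi)).length = hi.toNat - lo.toNat := by
    rw [hslice]; simp; omega
  rcases hd with rfl | rfl
  · -- d = 0
    unfold pvG pvView
    rw [if_pos rfl, pvGoA_eq_any _ (by omega)]
    have hcast : ((PySem.List.slice l (some lo) (some hi)).length : Int) = hi - lo := by
      rw [hlenseg]; omega
    rw [hcast]
    apply pvAnyCongr
    intro i hmem
    rw [PySem.List.mem_pyRange_one] at hmem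
    unfold pvBody
    dsimp only
    rw [if_pos (by decide)]
    have e1 : PySem.List.slice l (some lo) (some (lo + i))
        = (PySem.List.slice l (some lo) (some hi)).take i.toNat := by
      rw [pvSliceTN l lo (lo + i) h0 (by omega), hslice, List.take_take]
      congr 1; omega
    have e2 : PySem.List.slice l (some (lo + i)) (some hi)
        = (PySem.List.slice l (some lo) (some hi)).drop i.toNat := by
      rw [pvSliceTN l (lo + i) hi (by omega) (by omega), hslice, List.drop_take, List.drop_drop]
      congr 1
      · omega
      · congr 1
        omega
    rw [PySem.List.slice_to _ (by omega : (0:Int) ≤ i),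
        PySem.List.slice_from _ (by omega : (0:Int) ≤ i)]
    rw [e1, e2]
    unfold pvG pvView
    rw [if_neg (by norm_num), if_neg (by norm_num), e1, e2]
  · -- d = 1
    unfold pvG pvView
    rw [if_neg (by norm_num), pvGoA_eq_any _ (by rw [List.length_reverse]; omega)]
    have hcast : (((PySem.List.slice l (some lo) (some hi)).reverse.length) : Int) = hi - lo := by
      rw [List.length_reverse, hlenseg]; omega
    rw [hcast]
    apply pvAnyCongr
    intro i hmem
    rw [PySem.List.mem_pyRange_one] at hmem
    unfold pvBody
    dsimp only
    rw [if_neg (by decide)]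
    have e1 : PySem.List.slice l (some (hi - i)) (some hi)
        = (PySem.List.slice l (some lo) (some hi)).drop
            ((PySem.List.slice l (some lo) (some hi)).length - i.toNat) := by
      rw [pvSliceTN l (hi - i) hi (by omega) (by omega), hlenseg, hslice, List.drop_take,
          List.drop_drop]
      congr 1
      · omega
      · congr 1
        omega
    have e2 : PySem.List.slice l (some lo) (some (hi - i))
        = (PySem.List.slice l (some lo) (some hi)).take
            ((PySem.List.slice l (some lo) (some hi)).length - i.toNat) := by
      rw [pvSliceTN l lo (hi - i) h0 (by omega), hlenseg, hslice, List.take_take]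
      congr 1; omega
    rw [PySem.List.slice_to _ (by omega : (0:Int) ≤ i),
        PySem.List.slice_from _ (by omega : (0:Int) ≤ i)]
    rw [List.take_reverse, List.drop_reverse]
    rw [pvMinRev, pvMaxRev, List.reverse_reverse, List.reverse_reverse]
    rw [← e1, ← e2]
    unfold pvG pvView
    rw [if_pos rfl, if_pos rfl]

-- pvSolve at fuel+1 written through the named step function (definitional)
lemma pvSolve_succ (l : List Char) (fuel : Nat) (lo hi d : Int)
    (memo : PySem.Dict (Int × Int × Int) Bool) :
    pvSolve l (fuel + 1) lo hi d memo =
      (if hi - lo == 1 then (memo, true)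
       else
        match memo.get? (lo, hi, d) with
        | some v => (memo, v)
        | none =>
          let r := (PySem.List.pyRange 1 (hi - lo) 1).foldl
            (pvStep l (pvSolve l fuel) lo hi d) (memo, false)
          (r.1.insert (lo, hi, d) r.2, r.2)) := rfl

lemma pvFold_spec (l : List Char) (fuel : Nat) (lo hi d : Int)
    (h0 : 0 ≤ lo) (h2 : lo + 2 ≤ hi) (hn : hi ≤ (l.length : Int)) (hd : d = 0 ∨ d = 1)
    (IH : ∀ lo' hi' d' memo', 0 ≤ lo' → lo' < hi' → hi' ≤ (l.length : Int) →
      (d' = 0 ∨ d' = 1) → hi' - lo' < hi - lo → pvSound l memo' →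
      pvSound l (pvSolve l fuel lo' hi' d' memo').1 ∧
      (pvSolve l fuel lo' hi' d' memo').2 = pvG l lo' hi' d') :
    ∀ is : List Int, (∀ i ∈ is, 1 ≤ i ∧ i < hi - lo) →
      ∀ st : PySem.Dict (Int × Int × Int) Bool × Bool, pvSound l st.1 →
      pvSound l ((is.foldl (pvStep l (pvSolve l fuel) lo hi d) st).1) ∧
      (is.foldl (pvStep l (pvSolve l fuel) lo hi d) st).2 = (st.2 || is.any (pvBody l lo hi d)) := by
  intro is
  induction is with
  | nil =>
    intro _ st hS
    exact ⟨hS, by simp⟩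
  | cons i rest ihrest =>
    intro hmem st hS
    obtain ⟨hi1, hi2⟩ := hmem i List.mem_cons_self
    have hmemr : ∀ j ∈ rest, 1 ≤ j ∧ j < hi - lo :=
      fun j hj => hmem j (List.mem_cons_of_mem _ hj)
    rw [List.foldl_cons, List.any_cons]
    by_cases hst : st.2 = true
    · rw [show pvStep l (pvSolve l fuel) lo hi d st i = st from by rw [pvStep, if_pos hst]]
      obtain ⟨S', hv⟩ := ihrest hmemr st hS
      refine ⟨S', ?_⟩
      rw [hv, hst]
      simp
    · have hstf : st.2 = false := by simpa using hst
      rw [pvStep, if_neg hst]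
      rcases hd with rfl | rfl
      · rw [if_pos (by decide)]
        dsimp only
        have hne1 : PySem.List.slice l (some lo) (some (lo + i)) ≠ [] := by
          rw [pvSliceTN l lo (lo + i) h0 (by omega)]
          intro hEq
          have := congrArg List.length hEq
          simp at this
          omega
        have hne2 : PySem.List.slice l (some (lo + i)) (some hi) ≠ [] := by
          rw [pvSliceTN l (lo + i) hi (by omega) (by omega)]
          intro hEq
          have := congrArg List.length hEq
          simp at this
          omega
        obtain ⟨mn, hmn⟩ : ∃ mn, PySem.List.min?
            (PySem.List.slice l (some lo) (some (lo + i))) (fun c => c) = some mn := by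
          cases h : PySem.List.min? (PySem.List.slice l (some lo) (some (lo + i))) (fun c => c) with
          | none => rw [PySem.List.min?_eq_none_iff] at h; exact absurd h hne1
          | some m => exact ⟨m, rfl⟩
        obtain ⟨mx, hmx⟩ : ∃ mx, PySem.List.max?
            (PySem.List.slice l (some (lo + i)) (some hi)) (fun c => c) = some mx := by
          cases h : PySem.List.max? (PySem.List.slice l (some (lo + i)) (some hi)) (fun c => c) with
          | none => rw [PySem.List.max?_eq_none_iff] at h; exact absurd h hne2
          | some m => exact ⟨m, rfl⟩
        simp only [hmn, hmx]
        have hbody : pvBody l lo hi 0 i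
            = (decide (mx < mn) && pvG l lo (lo + i) 1 && pvG l (lo + i) hi 1) := by
          unfold pvBody
          dsimp only
          rw [if_pos (by decide), hmn, hmx]
        by_cases hc : mx < mn
        · rw [show decide (mx < mn) = true from by simpa using hc, if_pos rfl]
          obtain ⟨S1, hb1⟩ := IH lo (lo + i) 1 st.1 h0 (by omega) (by omega) (Or.inr rfl)
            (by omega) hS
          by_cases hb1v : (pvSolve l fuel lo (lo + i) 1 st.1).2 = true
          · rw [hb1v, if_pos rfl]
            obtain ⟨S2, hb2⟩ := IH (lo + i) hi 1 (pvSolve l fuel lo (lo + i) 1 st.1).1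
              (by omega) (by omega) hn (Or.inr rfl) (by omega) S1
            have g1 : pvG l lo (lo + i) 1 = true := by rw [← hb1]; exact hb1v
            by_cases hb2v :
                (pvSolve l fuel (lo + i) hi 1 (pvSolve l fuel lo (lo + i) 1 st.1).1).2 = true
            · rw [hb2v, if_pos rfl]
              have g2 : pvG l (lo + i) hi 1 = true := by rw [← hb2]; exact hb2v
              obtain ⟨S', hv⟩ :=
                ihrest hmemr ((pvSolve l fuel (lo + i) hi 1 (pvSolve l fuel lo (lo + i) 1 st.1).1).1, true) S2
              refine ⟨S', ?_⟩
              rw [hv, hbody, g1, g2, hstf]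
              simp [hc]
            · have hb2f :
                  (pvSolve l fuel (lo + i) hi 1 (pvSolve l fuel lo (lo + i) 1 st.1).1).2 = false := by
                simpa using hb2v
              rw [hb2f, if_neg Bool.false_ne_true]
              have g2 : pvG l (lo + i) hi 1 = false := by rw [← hb2]; exact hb2f
              obtain ⟨S', hv⟩ :=
                ihrest hmemr ((pvSolve l fuel (lo + i) hi 1 (pvSolve l fuel lo (lo + i) 1 st.1).1).1, false) S2
              refine ⟨S', ?_⟩
              rw [hv, hbody, g2, hstf]
              simp
          · have hb1f : (pvSolve l fuel lo (lo + i) 1 st.1).2 = false := by simpa using hb1v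
            rw [hb1f, if_neg Bool.false_ne_true]
            have g1 : pvG l lo (lo + i) 1 = false := by rw [← hb1]; exact hb1f
            obtain ⟨S', hv⟩ := ihrest hmemr ((pvSolve l fuel lo (lo + i) 1 st.1).1, false) S1
            refine ⟨S', ?_⟩
            rw [hv, hbody, g1, hstf]
            simp
        · rw [show decide (mx < mn) = false from by simpa using hc, if_neg Bool.false_ne_true]
          obtain ⟨S', hv⟩ := ihrest hmemr st hS
          refine ⟨S', ?_⟩
          rw [hv, hbody, hstf]
          simp [hc]
      · rw [if_neg (by decide)]
        dsimp only
        have hne1 : PySem.List.slice l (some (hi - i)) (some hi) ≠ [] := by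
          rw [pvSliceTN l (hi - i) hi (by omega) (by omega)]
          intro hEq
          have := congrArg List.length hEq
          simp at this
          omega
        have hne2 : PySem.List.slice l (some lo) (some (hi - i)) ≠ [] := by
          rw [pvSliceTN l lo (hi - i) h0 (by omega)]
          intro hEq
          have := congrArg List.length hEq
          simp at this
          omega
        obtain ⟨mn, hmn⟩ : ∃ mn, PySem.List.min?
            (PySem.List.slice l (some (hi - i)) (some hi)) (fun c => c) = some mn := by
          cases h : PySem.List.min? (PySem.List.slice l (some (hi - i)) (some hi)) (fun c => c) with
          | none => rw [PySem.List.min?_eq_none_iff] at h; exact absurd h hne1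
          | some m => exact ⟨m, rfl⟩
        obtain ⟨mx, hmx⟩ : ∃ mx, PySem.List.max?
            (PySem.List.slice l (some lo) (some (hi - i))) (fun c => c) = some mx := by
          cases h : PySem.List.max? (PySem.List.slice l (some lo) (some (hi - i))) (fun c => c) with
          | none => rw [PySem.List.max?_eq_none_iff] at h; exact absurd h hne2
          | some m => exact ⟨m, rfl⟩
        simp only [hmn, hmx]
        have hbody : pvBody l lo hi 1 i
            = (decide (mx < mn) && pvG l (hi - i) hi 0 && pvG l lo (hi - i) 0) := by
          unfold pvBody
          dsimp only
          rw [if_neg (by decide), hmn, hmx]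
        by_cases hc : mx < mn
        · rw [show decide (mx < mn) = true from by simpa using hc, if_pos rfl]
          obtain ⟨S1, hb1⟩ := IH (hi - i) hi 0 st.1 (by omega) (by omega) hn (Or.inl rfl)
            (by omega) hS
          by_cases hb1v : (pvSolve l fuel (hi - i) hi 0 st.1).2 = true
          · rw [hb1v, if_pos rfl]
            obtain ⟨S2, hb2⟩ := IH lo (hi - i) 0 (pvSolve l fuel (hi - i) hi 0 st.1).1
              h0 (by omega) (by omega) (Or.inl rfl) (by omega) S1
            have g1 : pvG l (hi - i) hi 0 = true := by rw [← hb1]; exact hb1v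
            by_cases hb2v :
                (pvSolve l fuel lo (hi - i) 0 (pvSolve l fuel (hi - i) hi 0 st.1).1).2 = true
            · rw [hb2v, if_pos rfl]
              have g2 : pvG l lo (hi - i) 0 = true := by rw [← hb2]; exact hb2v
              obtain ⟨S', hv⟩ :=
                ihrest hmemr ((pvSolve l fuel lo (hi - i) 0 (pvSolve l fuel (hi - i) hi 0 st.1).1).1, true) S2
              refine ⟨S', ?_⟩
              rw [hv, hbody, g1, g2, hstf]
              simp [hc]
            · have hb2f :
                  (pvSolve l fuel lo (hi - i) 0 (pvSolve l fuel (hi - i) hi 0 st.1).1).2 = false := by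
                simpa using hb2v
              rw [hb2f, if_neg Bool.false_ne_true]
              have g2 : pvG l lo (hi - i) 0 = false := by rw [← hb2]; exact hb2f
              obtain ⟨S', hv⟩ :=
                ihrest hmemr ((pvSolve l fuel lo (hi - i) 0 (pvSolve l fuel (hi - i) hi 0 st.1).1).1, false) S2
              refine ⟨S', ?_⟩
              rw [hv, hbody, g2, hstf]
              simp
          · have hb1f : (pvSolve l fuel (hi - i) hi 0 st.1).2 = false := by simpa using hb1v
            rw [hb1f, if_neg Bool.false_ne_true]
            have g1 : pvG l (hi - i) hi 0 = false := by rw [← hb1]; exact hb1f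
            obtain ⟨S', hv⟩ := ihrest hmemr ((pvSolve l fuel (hi - i) hi 0 st.1).1, false) S1
            refine ⟨S', ?_⟩
            rw [hv, hbody, g1, hstf]
            simp
        · rw [show decide (mx < mn) = false from by simpa using hc, if_neg Bool.false_ne_true]
          obtain ⟨S', hv⟩ := ihrest hmemr st hS
          refine ⟨S', ?_⟩
          rw [hv, hbody, hstf]
          simp [hc]

lemma pvSolve_spec (l : List Char) : ∀ (fuel : Nat) (lo hi d : Int)
    (memo : PySem.Dict (Int × Int × Int) Bool),
    0 ≤ lo → lo < hi → hi ≤ (l.length : Int) → (d = 0 ∨ d = 1) → hi - lo ≤ (fuel : Int) →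
    pvSound l memo →
    pvSound l (pvSolve l fuel lo hi d memo).1 ∧ (pvSolve l fuel lo hi d memo).2 = pvG l lo hi d := by
  intro fuel
  induction fuel with
  | zero =>
    intro lo hi d memo h0 hlh hhn hd hf hS
    exact absurd hf (by push_cast; omega)
  | succ fuel ihf =>
    intro lo hi d memo h0 hlh hhn hd hf hS
    rw [pvSolve_succ]
    by_cases h1 : hi - lo = 1
    · rw [if_pos (by simp [h1])]
      have hhi : hi = lo + 1 := by omega
      subst hhi
      exact ⟨hS, (pvG_one l lo d h0 (by omega)).symm⟩
    · rw [if_neg (by simp [h1])]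
      cases hget : memo.get? (lo, hi, d) with
      | some v =>
        exact ⟨hS, hS lo hi d v hget⟩
      | none =>
        dsimp only
        have span2 : lo + 2 ≤ hi := by omega
        have IH' : ∀ lo' hi' d' memo', 0 ≤ lo' → lo' < hi' → hi' ≤ (l.length : Int) →
            (d' = 0 ∨ d' = 1) → hi' - lo' < hi - lo → pvSound l memo' →
            pvSound l (pvSolve l fuel lo' hi' d' memo').1 ∧
            (pvSolve l fuel lo' hi' d' memo').2 = pvG l lo' hi' d' := by
          intro lo' hi' d' memo' a b c dd e f
          exact ihf lo' hi' d' memo' a b c dd (by push_cast at hf; omega) f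
        obtain ⟨S1, hv⟩ := pvFold_spec l fuel lo hi d h0 span2 hhn hd IH'
          (PySem.List.pyRange 1 (hi - lo) 1)
          (fun j hj => PySem.List.mem_pyRange_one.mp hj) (memo, false) hS
        have hv2 : ((PySem.List.pyRange 1 (hi - lo) 1).foldl (pvStep l (pvSolve l fuel) lo hi d) (memo, false)).2
            = pvG l lo hi d := by
          rw [hv]
          simp only [Bool.false_or]
          exact pvAnyBody_correct l lo hi d h0 span2 hhn hd
        refine ⟨?_, hv2⟩
        intro lo' hi' d' v hget'
        rw [PySem.Dict.get?_insert] at hget'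
        by_cases hk : ((lo', hi', d') : Int × Int × Int) = (lo, hi, d)
        · rw [if_pos hk] at hget'
          injection hget' with hvv
          obtain ⟨h1', h2', h3'⟩ : lo' = lo ∧ hi' = hi ∧ d' = d := by
            simpa [Prod.ext_iff] using hk
          rw [h1', h2', h3', ← hvv]
          exact hv2
        · rw [if_neg hk] at hget'
          exact S1 lo' hi' d' v hget'

-- ===== VERDICT (by name: the statement is the Claim_ definition above) =====
theorem isPat_spec : Claim_equal_isPat := by
  intro s _
  unfold Spec_isPat isPat isPat_alt
  by_cases hn : (s.toList.length : Int) = 0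
  · rw [if_pos (by simpa using hn)]
    have hnil : s.toList = [] := List.eq_nil_of_length_eq_zero (by omega)
    rw [hnil, pvGoA]
    rw [if_neg (by simp)]
    simp [PySem.List.pyRange_one_eq_nil]
  · rw [if_neg (by simpa using hn)]
    have h1 : (1:Int) ≤ (s.toList.length : Int) := by
      have : 0 ≤ (s.toList.length : Int) := by positivity
      omega
    have hE : pvSound s.toList PySem.Dict.empty := by
      intro lo hi d v hget
      rw [PySem.Dict.get?_empty] at hget
      exact absurd hget (by simp)
    have := (pvSolve_spec s.toList s.toList.length 0 (s.toList.length : Int) 0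
      PySem.Dict.empty le_rfl (by omega) le_rfl (Or.inl rfl) (by omega) hE).2
    rw [this]
    unfold pvG pvView
    rw [if_pos rfl, pvSliceTN s.toList 0 (s.toList.length : Int) le_rfl (by omega)]
    simp [-String.length_toList]
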